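-- pv_equiv track=rewrite | github.com/dsweet99/dryer | test/benchmark_data/module_003.py | compute_3_9
-- ===== SOURCE A (Python) =====
-- def compute_3_9(a, b, c):
--     x = a * 79 + b * 104
--     y = c * 81 - a * 124
--     for i in range(17):
--         x = x + i * 19
--         y = y - i * 22
--         if x > 5390:
--             x = x % 1195
--     return x + y + 28
-- ===== SOURCE B (Python) =====
-- def compute_3_9(a, b, c):
--     # y never interacts with the x-loop: y = c*81 - a*124 - 22*(0+1+...+16) = c*81 - a*124 - 2992.
--     # x is computed by a tail recursion over the step index.
--     def go(x, i):
--         if i == 17: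
--             return x
--         x = x + i * 19
--         if x > 5390:
--             x = x % 1195
--         return go(x, i + 1)
--     return go(a * 79 + b * 104, 0) + (c * 81 - a * 124 - 2992) + 28
-- ===== Notes on version B (the rewrite author's own statement) =====
-- stated objective: simpler
-- what changed: y's accumulation is replaced by the closed form c*81 - a*124 - 2992 (the loop subtracts 22*136 independently of the branch), and the remaining x-only update becomes a tail recursion over the step index instead of a loop threading two variables.
import Mathlib
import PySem

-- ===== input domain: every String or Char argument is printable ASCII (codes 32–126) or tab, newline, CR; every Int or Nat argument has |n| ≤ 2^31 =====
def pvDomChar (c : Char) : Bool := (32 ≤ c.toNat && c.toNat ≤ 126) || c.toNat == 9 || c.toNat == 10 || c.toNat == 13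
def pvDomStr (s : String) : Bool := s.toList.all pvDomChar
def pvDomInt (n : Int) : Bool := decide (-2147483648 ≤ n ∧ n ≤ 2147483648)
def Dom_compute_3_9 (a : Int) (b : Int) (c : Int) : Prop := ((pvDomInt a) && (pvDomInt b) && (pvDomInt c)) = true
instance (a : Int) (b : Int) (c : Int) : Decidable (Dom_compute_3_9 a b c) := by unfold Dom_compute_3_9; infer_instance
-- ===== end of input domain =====

-- B computes y in closed form (c*81 - a*124 - 2992) and runs the x-only update as a tail recursion; simpler decomposition, same cost.


-- ===== PORT A =====
def compute_3_9 (a : Int) (b : Int) (c : Int) : Int :=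
  let x := a * 79 + b * 104
  let y := c * 81 - a * 124
  let p := (PySem.List.pyRange 0 17 1).foldl
    (fun (p : Int × Int) i =>
      let x := p.1 + i * 19
      let y := p.2 - i * 22
      (if x > 5390 then PySem.Int.mod x 1195 else x, y))
    (x, y)
  p.1 + p.2 + 28

-- ===== PORT B =====
-- tail recursion of Source B's inner 'go'
def compute_3_9_go (x : Int) (i : Int) : Int :=
  if h : 17 ≤ i then x  -- totality guard; Python's go is only ever called with 0 ≤ i ≤ 17, where this is 'i == 17'
  else
    let x := x + i * 19
    let x := if x > 5390 then PySem.Int.mod x 1195 else x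
    compute_3_9_go x (i + 1)
  termination_by (17 - i).toNat
  decreasing_by omega

def compute_3_9_alt (a : Int) (b : Int) (c : Int) : Int :=
  compute_3_9_go (a * 79 + b * 104) 0 + (c * 81 - a * 124 - 2992) + 28

-- ===== PRECONDITION & SPEC =====
def Spec_compute_3_9 (a : Int) (b : Int) (c : Int) (out : Int) : Prop := out = compute_3_9_alt a b c
instance (a : Int) (b : Int) (c : Int) (out : Int) : Decidable (Spec_compute_3_9 a b c out) := by unfold Spec_compute_3_9; infer_instance

-- ===== CLAIM (what is proved, stated in full; the proofs are below) =====
def Claim_equal_compute_3_9 : Prop := ∀ (a : Int) (b : Int) (c : Int), Dom_compute_3_9 a b c → Spec_compute_3_9 a b c (compute_3_9 a b c)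

-- ===== LEMMAS AND PROOFS =====

-- the paired fold of A splits: the x-component never reads y, and y just loses 22 * (sum of the indices)
theorem pairfold_split (l : List Int) (x y : Int) :
    l.foldl
      (fun (p : Int × Int) i =>
        let x := p.1 + i * 19
        let y := p.2 - i * 22
        (if x > 5390 then PySem.Int.mod x 1195 else x, y))
      (x, y)
    = (l.foldl (fun x i =>
        let x := x + i * 19
        if x > 5390 then PySem.Int.mod x 1195 else x) x,
       y - 22 * l.sum) := by
  induction l generalizing x y with
  | nil => simp
  | cons hd tl ih =>
    simp only [List.foldl_cons, List.sum_cons]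
    rw [ih]; congr 1; ring

-- one unfolding step of B's tail recursion, for i < 17
theorem go_step (x i : Int) (h : i < 17) :
    compute_3_9_go x i
    = compute_3_9_go
        (let x := x + i * 19; if x > 5390 then PySem.Int.mod x 1195 else x)
        (i + 1) := by
  rw [compute_3_9_go]
  simp [not_le.mpr h]

-- the x-only fold over the tail range(17-n, 17) is B's tail recursion started at 17-n
theorem xfold_suffix_eq_go (n : Nat) (hn : n ≤ 17) (x : Int) :
    (PySem.List.pyRange (17 - (n : Int)) 17 1).foldl (fun x i =>
        let x := x + i * 19
        if x > 5390 then PySem.Int.mod x 1195 else x) x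
    = compute_3_9_go x (17 - (n : Int)) := by
  induction n generalizing x with
  | zero =>
    rw [PySem.List.pyRange_one_eq_nil (by norm_num)]
    rw [compute_3_9_go]
    norm_num
  | succ n ih =>
    rw [PySem.List.pyRange_one_cons (by push_cast; omega)]
    rw [List.foldl_cons]
    rw [go_step _ _ (by push_cast; omega)]
    have h1 : (17 : Int) - (n + 1 : Nat) + 1 = 17 - (n : Int) := by push_cast; ring
    rw [h1]
    exact ih (by omega) _

-- the x-only fold over range(17) is B's tail recursion started at 0
theorem xfold_eq_go (x : Int) :
    (PySem.List.pyRange 0 17 1).foldl (fun x i =>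
        let x := x + i * 19
        if x > 5390 then PySem.Int.mod x 1195 else x) x
    = compute_3_9_go x 0 := by
  have h := xfold_suffix_eq_go 17 (le_refl 17) x
  rw [show ((17 : Int) - ((17 : Nat) : Int)) = 0 by norm_num] at h
  exact h

-- ===== VERDICT (by name: the statement is the Claim_ definition above) =====
theorem compute_3_9_spec : Claim_equal_compute_3_9 := by
  intro a b c _
  show compute_3_9 a b c = compute_3_9_alt a b c
  unfold compute_3_9 compute_3_9_alt
  dsimp only
  rw [pairfold_split, ← xfold_eq_go]
  have hs : (PySem.List.pyRange 0 17 1).sum = 136 := by decide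
  simp [hs]
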